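-- pv_equiv track=rewrite | github.com/RoshanKolhe/IDP-AI-Backend | idp-backend/docker/airflow/dags/document_index_dag.py | _should_retry_with_upload
-- ===== SOURCE A (Python) =====
-- def _should_retry_with_upload(error_text):
--     if not isinstance(error_text, str):
--         return False
--
--     lowered = error_text.lower()
--     retry_markers = [
--         "uploadfile",
--         "expected uploadfile",
--         "file_paths",
--         "files.0",
--         "no such file",
--         "not found",
--         "does not exist",
--         "cannot access",
--         "permission denied",
--     ]
--     return any(marker in lowered for marker in retry_markers)
-- ===== SOURCE B (Python) =====
-- _RETRY_MARKERS = (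
--     "uploadfile",
--     "expected uploadfile",
--     "file_paths",
--     "files.0",
--     "no such file",
--     "not found",
--     "does not exist",
--     "cannot access",
--     "permission denied",
-- )
--
--
-- def _should_retry_with_upload(error_text):
--     # Single left-to-right scan: at each position check whether any marker
--     # starts there, instead of one full substring search per marker.
--     if not isinstance(error_text, str):
--         return False
--     lowered = error_text.lower()
--     for i in range(len(lowered) + 1):
--         for marker in _RETRY_MARKERS:
--             if lowered.startswith(marker, i):
--                 return True
--     return False
-- ===== Notes on version B (the rewrite author's own statement) =====
-- stated objective: alternative
-- what changed: A runs one full substring search per marker (any(marker in lowered)); B makes a single left-to-right pass over the string, testing at each position whether any marker begins there.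
import Mathlib
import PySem

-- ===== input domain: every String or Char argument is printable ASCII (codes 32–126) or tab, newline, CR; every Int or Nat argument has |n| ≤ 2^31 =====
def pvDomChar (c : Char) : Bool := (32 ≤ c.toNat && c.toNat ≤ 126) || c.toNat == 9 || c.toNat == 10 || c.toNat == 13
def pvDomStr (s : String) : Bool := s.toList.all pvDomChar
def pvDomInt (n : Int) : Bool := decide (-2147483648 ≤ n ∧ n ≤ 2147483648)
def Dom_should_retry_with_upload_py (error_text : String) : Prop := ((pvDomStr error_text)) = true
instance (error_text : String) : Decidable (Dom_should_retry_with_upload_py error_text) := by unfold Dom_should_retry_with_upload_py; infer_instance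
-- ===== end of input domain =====

-- B replaces A's per-marker substring searches by one left-to-right scan of the
-- string that tests at each position whether any marker starts there (alternative
-- traversal, same cost class).

-- ===== PORT A =====
-- A: lowercase, then `any(marker in lowered for marker in retry_markers)`.
def should_retry_with_upload_py (error_text : String) : Bool :=
  let lowered := PySem.Str.lower error_text
  [ "uploadfile", "expected uploadfile", "file_paths", "files.0",
    "no such file", "not found", "does not exist", "cannot access",
    "permission denied" ].any (fun marker => PySem.Str.isIn marker lowered)

-- ===== PORT B =====
def pvRetryMarkers : List String :=
  [ "uploadfile", "expected uploadfile", "file_paths", "files.0",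
    "no such file", "not found", "does not exist", "cannot access",
    "permission denied" ]

-- B's loop `for i in range(len+1): for marker ...: lowered.startswith(marker, i)`
-- as structural recursion over the suffixes of the lowered string.
def pvScan : List Char → Bool
  | [] => pvRetryMarkers.any (fun m => PySem.Chars.startswith [] m.toList)
  | c :: t =>
      pvRetryMarkers.any (fun m => PySem.Chars.startswith (c :: t) m.toList) || pvScan t

def should_retry_with_upload_py_alt (error_text : String) : Bool :=
  pvScan (PySem.Str.lower error_text).toList

-- ===== PRECONDITION & SPEC =====
def Spec_should_retry_with_upload_py (error_text : String) (out : Bool) : Prop := out = should_retry_with_upload_py_alt error_text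
instance (error_text : String) (out : Bool) : Decidable (Spec_should_retry_with_upload_py error_text out) := by unfold Spec_should_retry_with_upload_py; infer_instance

-- ===== CLAIM (what is proved, stated in full; the proofs are below) =====
def Claim_equal_should_retry_with_upload_py : Prop := ∀ (error_text : String), Dom_should_retry_with_upload_py error_text → Spec_should_retry_with_upload_py error_text (should_retry_with_upload_py error_text)

-- ===== LEMMAS AND PROOFS =====
theorem pvScan_iff (s : List Char) :
    pvScan s = true ↔ ∃ m ∈ pvRetryMarkers, m.toList <:+: s := by
  induction s with
  | nil =>
      simp [pvScan, List.any_eq_true, PySem.Chars.startswith_iff]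
  | cons c t ih =>
      simp only [pvScan, Bool.or_eq_true, List.any_eq_true,
        PySem.Chars.startswith_iff, ih, List.infix_cons_iff]
      constructor
      · rintro (⟨m, hm, h⟩ | ⟨m, hm, h⟩)
        · exact ⟨m, hm, Or.inl h⟩
        · exact ⟨m, hm, Or.inr h⟩
      · rintro ⟨m, hm, h | h⟩
        · exact Or.inl ⟨m, hm, h⟩
        · exact Or.inr ⟨m, hm, h⟩

-- ===== VERDICT (by name: the statement is the Claim_ definition above) =====
theorem should_retry_with_upload_py_spec : Claim_equal_should_retry_with_upload_py := by
  intro error_text _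
  unfold Spec_should_retry_with_upload_py
  rw [Bool.eq_iff_iff]
  simp [should_retry_with_upload_py, should_retry_with_upload_py_alt,
    pvScan_iff, pvRetryMarkers, PySem.Chars.isIn_iff_infix]
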